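-- pv_equiv track=rewrite | github.com/martin-bachmann/project-data-structures-two | src/analyze_log.py | verificar_pratos_nao_pedidos
-- ===== SOURCE A (Python) =====
-- def contador_nao_pedidos(data):
--     nao_pedidos = set()
--
--     for pedido in data.items():
--         if pedido[1] == 0:
--             nao_pedidos.add(pedido[0])
--
--     return nao_pedidos
--
-- def verificar_pratos_nao_pedidos(data, cliente):
--     pedidos = {}
--     for item in data:
--         if item["pedido"] not in pedidos:
--             pedidos[item["pedido"]] = 0
--         if item["cliente"] == cliente:
--             pedidos[item["pedido"]] += 1
--
--     return contador_nao_pedidos(pedidos)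
-- ===== SOURCE B (Python) =====
-- def verificar_pratos_nao_pedidos(data, cliente):
--     all_dishes = {item["pedido"] for item in data}
--     ordered_by_client = {item["pedido"] for item in data if item["cliente"] == cliente}
--     return all_dishes - ordered_by_client
-- ===== Notes on version B (the rewrite author's own statement) =====
-- stated objective: simpler
-- what changed: Replaces the per-dish counting dictionary plus zero-count filter with two set comprehensions (all dishes, dishes the client ordered) and one set difference.
import Mathlib
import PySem

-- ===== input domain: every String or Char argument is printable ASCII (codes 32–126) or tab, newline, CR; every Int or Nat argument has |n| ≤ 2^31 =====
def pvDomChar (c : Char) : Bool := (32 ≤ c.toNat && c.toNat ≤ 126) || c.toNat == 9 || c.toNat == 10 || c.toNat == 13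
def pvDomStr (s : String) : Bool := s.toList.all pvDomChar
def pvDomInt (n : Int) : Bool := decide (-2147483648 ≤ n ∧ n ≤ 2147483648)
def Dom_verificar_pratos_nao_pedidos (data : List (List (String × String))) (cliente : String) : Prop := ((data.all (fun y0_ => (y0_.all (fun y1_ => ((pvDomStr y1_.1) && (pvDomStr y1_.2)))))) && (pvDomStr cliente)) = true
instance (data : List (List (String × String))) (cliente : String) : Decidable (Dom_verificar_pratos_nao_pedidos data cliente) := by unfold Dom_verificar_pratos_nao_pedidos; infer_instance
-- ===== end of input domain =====

-- B replaces A's per-dish counting dictionary and zero-count filter with two sets (all dishes, dishes the client ordered) and a set difference: simpler, same cost.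


-- shared dict-lookup helper: item[k] on the Python dict `item` (first match; exact when the key is present, which Pre_ guarantees)
def pvItemGet (item : List (String × String)) (k : String) : String :=
  ((PySem.Dict.mk item).get? k).getD ""

-- ===== PORT A =====
def contador_nao_pedidos (data : PySem.Dict String Int) : List String :=
  data.items.foldl (fun nao_pedidos pedido =>
    if pedido.2 == 0 then PySem.Set.add nao_pedidos pedido.1 else nao_pedidos)
    PySem.Set.empty

-- one iteration of A's `for item in data` loop body
def pedidosStep (cliente : String) (pedidos : PySem.Dict String Int) (item : List (String × String)) : PySem.Dict String Int :=
  let p := pvItemGet item "pedido"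
  let pedidos := if pedidos.contains p then pedidos else pedidos.insert p 0
  if pvItemGet item "cliente" == cliente then pedidos.modify p 0 (· + 1) else pedidos

def verificar_pratos_nao_pedidos (data : List (List (String × String))) (cliente : String) : List String :=
  let pedidos : PySem.Dict String Int := data.foldl (pedidosStep cliente) PySem.Dict.empty
  contador_nao_pedidos pedidos

-- ===== PORT B =====
def verificar_pratos_nao_pedidos_alt (data : List (List (String × String))) (cliente : String) : List String :=
  let all_dishes : PySem.Set String :=
    PySem.Set.ofList (data.map (fun item => pvItemGet item "pedido"))
  let ordered_by_client : PySem.Set String :=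
    PySem.Set.ofList ((data.filter (fun item => pvItemGet item "cliente" == cliente)).map
      (fun item => pvItemGet item "pedido"))
  PySem.Set.diff all_dishes ordered_by_client

-- ===== PRECONDITION & SPEC =====
-- A raises KeyError when an item lacks the key "pedido" or "cliente"; Pre_ requires both keys present in every item.
def Pre_verificar_pratos_nao_pedidos (data : List (List (String × String))) (cliente : String) : Prop :=
  ∀ item ∈ data, ((PySem.Dict.mk item).get? "pedido").isSome ∧ ((PySem.Dict.mk item).get? "cliente").isSome
instance (data : List (List (String × String))) (cliente : String) : Decidable (Pre_verificar_pratos_nao_pedidos data cliente) := by unfold Pre_verificar_pratos_nao_pedidos; infer_instance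

def pvWitness_verificar_pratos_nao_pedidos : (List (List (String × String))) × String :=
  ([[("pedido", "sopa"), ("cliente", "ana")], [("pedido", "bife"), ("cliente", "rui")]], "ana")

def Spec_verificar_pratos_nao_pedidos (data : List (List (String × String))) (cliente : String) (out : List String) : Prop := out = verificar_pratos_nao_pedidos_alt data cliente
instance (data : List (List (String × String))) (cliente : String) (out : List String) : Decidable (Spec_verificar_pratos_nao_pedidos data cliente out) := by unfold Spec_verificar_pratos_nao_pedidos; infer_instance

-- ===== CLAIM (what is proved, stated in full; the proofs are below) =====
def Claim_equal_verificar_pratos_nao_pedidos : Prop := ∀ (data : List (List (String × String))) (cliente : String), Dom_verificar_pratos_nao_pedidos data cliente → Pre_verificar_pratos_nao_pedidos data cliente → Spec_verificar_pratos_nao_pedidos data cliente (verificar_pratos_nao_pedidos data cliente)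

-- ===== LEMMAS AND PROOFS =====

theorem keys_pedidosStep (cliente : String) (d : PySem.Dict String Int) (item : List (String × String)) :
    (pedidosStep cliente d item).keys = PySem.Set.add d.keys (pvItemGet item "pedido") := by
  unfold pedidosStep
  set p := pvItemGet item "pedido" with hp
  have h1keys : (if d.contains p then d else d.insert p 0).keys = PySem.Set.add d.keys p := by
    by_cases hc : d.contains p = true
    · rw [if_pos hc, PySem.Set.add_of_mem ((PySem.Dict.contains_iff_mem_keys d p).mp hc)]
    · rw [if_neg hc, PySem.Dict.keys_insert_of_not_contains d 0 (Bool.not_eq_true _ ▸ hc),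
        PySem.Set.add_of_not_mem (fun hm => hc ((PySem.Dict.contains_iff_mem_keys d p).mpr hm))]
  by_cases hcli : (pvItemGet item "cliente" == cliente) = true
  · rw [if_pos hcli, PySem.Dict.keys_modify, PySem.Dict.keys_insert_of_contains _ _
      (by rw [PySem.Dict.contains_iff_mem_keys, h1keys, PySem.Set.mem_add]; right; rfl), h1keys]
  · rw [if_neg hcli, h1keys]

theorem nodup_keys_pedidosStep (cliente : String) (d : PySem.Dict String Int)
    (item : List (String × String)) (hnd : d.keys.Nodup) : (pedidosStep cliente d item).keys.Nodup := by
  rw [keys_pedidosStep, PySem.Set.add_eq_ite]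
  split_ifs with h
  · exact hnd
  · rw [List.nodup_append]
    refine ⟨hnd, List.nodup_singleton _, ?_⟩
    intro a ha b hb
    rw [List.mem_singleton] at hb
    subst hb
    exact fun e => h (e ▸ ha)

theorem getD_pedidosStep (cliente : String) (d : PySem.Dict String Int)
    (item : List (String × String)) (k : String) :
    (pedidosStep cliente d item).getD k 0 = d.getD k 0 +
      (if (pvItemGet item "cliente" == cliente) = true ∧ k = pvItemGet item "pedido" then 1 else 0) := by
  unfold pedidosStep
  set p := pvItemGet item "pedido" with hp
  have h1getD : ∀ j, (if d.contains p then d else d.insert p 0).getD j 0 = d.getD j 0 := by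
    intro j
    by_cases hc : d.contains p = true
    · rw [if_pos hc]
    · rw [if_neg hc, PySem.Dict.getD_insert]
      split_ifs with hj
      · subst hj; rw [PySem.Dict.getD_of_not_contains d 0 (Bool.not_eq_true _ ▸ hc)]
      · rfl
  by_cases hcli : (pvItemGet item "cliente" == cliente) = true
  · rw [if_pos hcli, PySem.Dict.getD_modify]
    by_cases hk : k = p
    · rw [if_pos hk, h1getD, if_pos ⟨hcli, hk⟩, hk]
    · rw [if_neg hk, h1getD, if_neg (fun h => hk h.2)]; ring
  · rw [if_neg hcli, h1getD, if_neg (fun h => hcli h.1)]; ring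

-- The loop invariant of A's dict-building fold: keys accumulate the dishes (as a set,
-- in first-occurrence order) and each value is the count of this client's orders of that dish.
theorem pedidos_fold_inv (cliente : String) (data : List (List (String × String)))
    (d : PySem.Dict String Int) (hnd : d.keys.Nodup) :
    (data.foldl (pedidosStep cliente) d).keys
      = PySem.Set.update d.keys (data.map (fun item => pvItemGet item "pedido")) ∧
    (data.foldl (pedidosStep cliente) d).keys.Nodup ∧
    ∀ k, (data.foldl (pedidosStep cliente) d).getD k 0
      = d.getD k 0 + (((data.filter (fun item => pvItemGet item "cliente" == cliente)).map
          (fun item => pvItemGet item "pedido")).count k : Int) := by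
  have hcount : ∀ (b : String) (L : List String) (k : String),
      (List.count k (b :: L) : Int) = (List.count k L : Int) + (if k = b then 1 else 0) := by
    intro b L k
    simp only [List.count_cons]
    by_cases h : k = b
    · subst h; simp
    · have hb : (b == k) = false := beq_eq_false_iff_ne.mpr (fun e => h e.symm)
      simp [hb, h]
  induction data generalizing d with
  | nil =>
    refine ⟨?_, hnd, ?_⟩
    · simp [PySem.Set.update_nil]
    · intro k; simp
  | cons item rest ih =>
    simp only [List.foldl_cons]
    obtain ⟨ihk, ihnd, ihg⟩ := ih (pedidosStep cliente d item) (nodup_keys_pedidosStep cliente d item hnd)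
    refine ⟨?_, ihnd, ?_⟩
    · rw [ihk, keys_pedidosStep, List.map_cons, PySem.Set.update_cons]
    · intro k
      rw [ihg k, getD_pedidosStep, List.filter_cons]
      by_cases hcli : (pvItemGet item "cliente" == cliente) = true
      · rw [if_pos hcli, List.map_cons, hcount]
        by_cases hk : k = pvItemGet item "pedido"
        · rw [if_pos ⟨hcli, hk⟩, if_pos hk]; ring
        · rw [if_neg (fun h => hk h.2), if_neg hk]; ring
      · rw [if_neg hcli, if_neg (fun h => hcli h.1)]; ring

-- contador's fold over a list of distinct keys is a filter.
theorem contador_fold_filter (g : String → Int) :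
    ∀ (l : List String) (s : PySem.Set String), s.Nodup → l.Nodup → (∀ x ∈ l, x ∉ s) →
    ((l.map (fun k => (k, g k))).foldl (fun nao_pedidos pedido =>
        if pedido.2 == 0 then PySem.Set.add nao_pedidos pedido.1 else nao_pedidos) s)
      = s ++ l.filter (fun k => g k == 0) := by
  intro l
  induction l with
  | nil => intro s _ _ _; simp
  | cons x xs ih =>
    intro s hs hnl hdisj
    have hxs : x ∉ s := hdisj x (by simp)
    simp only [List.map_cons, List.foldl_cons, List.filter_cons]
    by_cases h0 : (g x == 0) = true
    · simp only [h0, if_true]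
      rw [PySem.Set.add_of_not_mem hxs,
        ih (s ++ [x]) (by
            rw [List.nodup_append]
            refine ⟨hs, List.nodup_singleton _, ?_⟩
            intro a ha b hb
            rw [List.mem_singleton] at hb
            subst hb
            exact fun e => hxs (e ▸ ha)) hnl.of_cons
          (fun y hy => by
            simp only [List.mem_append, List.mem_singleton]
            rintro (hmem | rfl)
            · exact hdisj y (List.mem_cons_of_mem _ hy) hmem
            · exact (List.nodup_cons.mp hnl).1 hy)]
      simp
    · simp only [h0, Bool.false_eq_true, if_false]
      exact ih s hs hnl.of_cons (fun y hy => hdisj y (List.mem_cons_of_mem _ hy))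

-- ===== VERDICT (by name: the statement is the Claim_ definition above) =====
theorem verificar_pratos_nao_pedidos_spec : Claim_equal_verificar_pratos_nao_pedidos := by
  intro data cliente _ _
  obtain ⟨hk, hnd, hg⟩ := pedidos_fold_inv cliente data PySem.Dict.empty PySem.Dict.nodup_keys_empty
  rw [PySem.Dict.keys_empty, PySem.Set.update_nil_left] at hk
  unfold Spec_verificar_pratos_nao_pedidos verificar_pratos_nao_pedidos verificar_pratos_nao_pedidos_alt contador_nao_pedidos
  show (List.foldl (fun nao_pedidos pedido =>
      if pedido.2 == 0 then PySem.Set.add nao_pedidos pedido.1 else nao_pedidos)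
      PySem.Set.empty (List.foldl (pedidosStep cliente) PySem.Dict.empty data).items)
    = PySem.Set.diff (PySem.Set.ofList (data.map (fun item => pvItemGet item "pedido")))
      (PySem.Set.ofList ((data.filter (fun item => pvItemGet item "cliente" == cliente)).map
        (fun item => pvItemGet item "pedido")))
  rw [PySem.Dict.items_eq_map_keys _ hnd 0,
    contador_fold_filter (fun k => ((data.foldl (pedidosStep cliente) PySem.Dict.empty).getD k 0))
      _ PySem.Set.empty List.nodup_nil hnd (by intro x _ hx; simp [PySem.Set.empty] at hx), hk]
  show [] ++ _ = _
  rw [List.nil_append]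
  simp only [PySem.Set.diff]
  apply List.filter_congr
  intro x _
  rw [hg x, PySem.Dict.getD_empty]
  by_cases hm : x ∈ ((data.filter (fun item => pvItemGet item "cliente" == cliente)).map
      (fun item => pvItemGet item "pedido"))
  · have hc : (PySem.Set.ofList ((data.filter (fun item => pvItemGet item "cliente" == cliente)).map
        (fun item => pvItemGet item "pedido"))).contains x = true := by
      rw [PySem.Set.contains_iff, PySem.Set.mem_ofList]; exact hm
    have hcnt : ((data.filter (fun item => pvItemGet item "cliente" == cliente)).map
        (fun item => pvItemGet item "pedido")).count x ≠ 0 :=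
      fun h => (List.count_eq_zero.mp h) hm
    simp only [hc, Bool.not_true, zero_add, beq_eq_false_iff_ne, ne_eq, Int.natCast_eq_zero]
    exact hcnt
  · have hc : (PySem.Set.ofList ((data.filter (fun item => pvItemGet item "cliente" == cliente)).map
        (fun item => pvItemGet item "pedido"))).contains x = false := by
      cases h : (PySem.Set.ofList ((data.filter (fun item => pvItemGet item "cliente" == cliente)).map
          (fun item => pvItemGet item "pedido"))).contains x
      · rfl
      · rw [PySem.Set.contains_iff, PySem.Set.mem_ofList] at h; exact absurd h hm
    simp only [hc, Bool.not_false, zero_add]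
    rw [List.count_eq_zero.mpr hm]
    simp
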